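-- pv_equiv track=rewrite | github.com/MarkMoretto/python-examples-main | stackoverflow-solutions/submission-scripts/SO_Q69761150_why_am_I_getting_errors_recursion.py | recMerge
-- ===== SOURCE A (Python) =====
-- def recMerge(a, b):
--     'Merge two strings together recursivly'
--     # Check types
--     if type(a) == type(b) == str:
--         # Run until b is empty.
--         if len(b) > 0:
--             # Deconstructing into single and rest of items with asterisk.
--             aa, *a_rest = a
--             bb, *b_rest = b
--             # New `a` value that prepends the rest of a in
--             # front of the concatenation of the current a and b characters.
--             # Since a_rest is a list, we should "collect" the items back into
--             # a proper string format.
--             a = "".join(a_rest) + aa + bb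
--             # Return the new a with another concatenated list for the
--             # remaining b items.
--             return recMerge(a, "".join(b_rest))
--     # Return a.  Ensure that it is a string.
--     return "".join(a)
-- ===== SOURCE B (Python) =====
-- def recMerge(a, b):
--     'Merge two strings together recursivly'
--     if type(a) == type(b) == str:
--         # O(n+m) queue simulation: instead of rebuilding strings each step,
--         # keep one growing char buffer and a head pointer; each step consumes
--         # the head char and appends it followed by the next char of b.
--         buf = list(a)
--         h = 0
--         for ch in b:
--             buf.append(buf[h])
--             buf.append(ch)
--             h += 1
--         return "".join(buf[h:])
--     return "".join(a)
-- ===== Notes on version B (the rewrite author's own statement) =====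
-- stated objective: faster
-- what changed: Replaces the tail recursion that rebuilds both strings with join/concatenation at every step by a single pass over b using one growing character buffer and a head pointer (a queue), so no intermediate strings are ever built.
import Mathlib
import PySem

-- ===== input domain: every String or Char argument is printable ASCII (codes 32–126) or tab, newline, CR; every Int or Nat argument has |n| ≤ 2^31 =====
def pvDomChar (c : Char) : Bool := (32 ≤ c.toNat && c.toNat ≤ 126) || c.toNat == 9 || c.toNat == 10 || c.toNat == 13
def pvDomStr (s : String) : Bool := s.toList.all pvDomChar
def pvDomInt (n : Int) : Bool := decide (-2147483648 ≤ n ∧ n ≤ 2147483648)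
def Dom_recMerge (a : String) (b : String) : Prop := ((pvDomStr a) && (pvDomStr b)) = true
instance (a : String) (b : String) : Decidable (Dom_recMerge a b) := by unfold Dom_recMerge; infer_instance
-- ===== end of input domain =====

-- B replaces A's per-step string rebuilding recursion by one linear pass with a buffer and head pointer (faster).
-- Both A and B raise on a = "" with b ≠ "" (ValueError / IndexError); Pre_ excludes exactly those inputs.

-- ===== PORT A =====
-- A's recursion: while b nonempty, a := a[1:] + a[0] + b[0]; b := b[1:].  On a = "", b ≠ "" Python
-- raises ValueError (unpacking); that input is outside Pre_, the port returns [] there.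
def recMergeAux : List Char → List Char → List Char
  | a, [] => a
  | [], _ :: _ => []   -- Python raises ValueError here (excluded by Pre_)
  | aa :: a_rest, bb :: b_rest => recMergeAux (a_rest ++ [aa, bb]) b_rest

def recMerge (a : String) (b : String) : String :=
  String.mk (recMergeAux a.toList b.toList)

-- ===== PORT B =====
-- one step of B's loop: append buf[h] and the current char of b, advance h.
-- buf[h] is in range on every input Pre_ admits; Python raises IndexError otherwise (excluded by Pre_).
def altStep (st : List Char × Nat) (ch : Char) : List Char × Nat :=
  (st.1 ++ [st.1.getD st.2 ' ', ch], st.2 + 1)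

def recMerge_alt (a : String) (b : String) : String :=
  let st := b.toList.foldl altStep (a.toList, 0)
  String.mk (st.1.drop st.2)

-- ===== PRECONDITION & SPEC =====
-- Pre_ excludes exactly the inputs on which A raises ValueError: a empty while b nonempty.
def Pre_recMerge (a : String) (b : String) : Prop := a ≠ "" ∨ b = ""
instance (a : String) (b : String) : Decidable (Pre_recMerge a b) := by unfold Pre_recMerge; infer_instance

def pvWitness_recMerge : String × String := ("abc", "xy")

def Spec_recMerge (a : String) (b : String) (out : String) : Prop := out = recMerge_alt a b
instance (a : String) (b : String) (out : String) : Decidable (Spec_recMerge a b out) := by unfold Spec_recMerge; infer_instance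

-- ===== CLAIM (what is proved, stated in full; the proofs are below) =====
def Claim_equal_recMerge : Prop := ∀ (a : String) (b : String), Dom_recMerge a b → Pre_recMerge a b → Spec_recMerge a b (recMerge a b)

-- ===== LEMMAS AND PROOFS =====

-- Loop invariant: A's recursion on the suffix buf.drop h equals B's fold carrying (buf, h).
theorem recMergeAux_foldl (bl : List Char) :
    ∀ (buf : List Char) (h : Nat), h < buf.length →
      recMergeAux (buf.drop h) bl = ((bl.foldl altStep (buf, h)).1).drop ((bl.foldl altStep (buf, h)).2) := by
  induction bl with
  | nil => intro buf h _; simp [recMergeAux]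
  | cons bb br ih =>
      intro buf h hh
      have hdrop : buf.drop h = buf[h] :: buf.drop (h + 1) := List.drop_eq_getElem_cons hh
      have hgetD : buf.getD h ' ' = buf[h] := List.getD_eq_getElem buf ' ' hh
      rw [hdrop]
      show recMergeAux (buf.drop (h+1) ++ [buf[h], bb]) br = _
      have hdrop2 : (buf ++ [buf.getD h ' ', bb]).drop (h + 1)
          = buf.drop (h + 1) ++ [buf[h], bb] := by
        rw [List.drop_append_of_le_length (by omega), hgetD]
      have := ih (buf ++ [buf.getD h ' ', bb]) (h + 1)
        (by simp; omega)
      rw [hdrop2] at this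
      rw [this]
      simp [List.foldl_cons, altStep]

theorem recMerge_spec : Claim_equal_recMerge := by
  intro a b _ hpre
  unfold Spec_recMerge recMerge recMerge_alt
  cases ha : a.toList with
  | nil =>
      -- then b = "" by Pre_
      have hb : b = "" := by
        rcases hpre with h | h
        · exact absurd (String.toList_eq_nil_iff.mp ha) h
        · exact h
      subst hb
      simp [ha, recMergeAux]

  | cons x xs =>
      have h0 : 0 < a.toList.length := by rw [ha]; simp
      have := recMergeAux_foldl b.toList a.toList 0 h0
      rw [← ha]
      simpa using congrArg String.mk this
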